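-- pv_equiv track=rewrite | github.com/TheDurodola/my_python_journey | ClassWork/listfuntion.py | sum_of_items_at_odd_index
-- ===== SOURCE A (Python) =====
-- def sum_of_items_at_odd_index(listparameter):
--     number_of_number = 0
--     for item in listparameter:
--         number_of_number += 1
--
--     sum_of_items = 0
--     for index in range(number_of_number):
--         if index % 2 != 0:
--             sum_of_items += listparameter[index]
--     return sum_of_items
-- ===== SOURCE B (Python) =====
-- def sum_of_items_at_odd_index(listparameter):
--     # Single pass with a parity toggle: no length counting, no indexing.
--     total = 0
--     odd = False
--     for item in listparameter:
--         if odd: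
--             total += item
--         odd = not odd
--     return total
-- ===== Notes on version B (the rewrite author's own statement) =====
-- stated objective: simpler
-- what changed: Replaces A's manual length-counting loop plus an index scan over range(n) with a parity test and subscripting with a single direct pass over the elements carrying a boolean toggle, so no length and no indexing are ever computed.
import Mathlib
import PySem

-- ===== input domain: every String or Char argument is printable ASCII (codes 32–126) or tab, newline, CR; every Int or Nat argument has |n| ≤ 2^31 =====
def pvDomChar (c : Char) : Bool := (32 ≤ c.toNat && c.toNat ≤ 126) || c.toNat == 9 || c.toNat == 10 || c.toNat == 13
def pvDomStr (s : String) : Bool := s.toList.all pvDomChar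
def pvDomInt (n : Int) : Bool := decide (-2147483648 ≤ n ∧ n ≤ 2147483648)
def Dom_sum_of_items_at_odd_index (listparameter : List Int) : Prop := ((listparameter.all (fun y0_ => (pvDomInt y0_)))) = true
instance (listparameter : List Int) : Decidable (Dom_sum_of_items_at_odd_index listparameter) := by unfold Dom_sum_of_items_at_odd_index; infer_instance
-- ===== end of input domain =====

-- B replaces A's length-count loop + index/parity scan by a single direct pass over the
-- elements with a boolean parity toggle (no length, no indexing); return values proved equal.

-- ===== PORT A =====
-- number_of_number: count the elements one by one; then scan range(n) and add odd-index items.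
def sum_of_items_at_odd_index (listparameter : List Int) : Int :=
  let number_of_number : Int := listparameter.foldl (fun acc _ => acc + 1) 0
  (PySem.List.pyRange 0 number_of_number 1).foldl
    (fun sum_of_items index =>
      if index % 2 ≠ 0 then sum_of_items + PySem.List.pyGetD listparameter index 0
      else sum_of_items) 0

-- ===== PORT B =====
-- one pass over the items; add item when the toggle says the index is odd, flip the toggle
def sum_of_items_at_odd_index_alt (listparameter : List Int) : Int :=
  (listparameter.foldl
    (fun st item => (if st.2 then st.1 + item else st.1, !st.2)) (0, false)).1

-- ===== PRECONDITION & SPEC =====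
def Spec_sum_of_items_at_odd_index (listparameter : List Int) (out : Int) : Prop := out = sum_of_items_at_odd_index_alt listparameter
instance (listparameter : List Int) (out : Int) : Decidable (Spec_sum_of_items_at_odd_index listparameter out) := by unfold Spec_sum_of_items_at_odd_index; infer_instance

-- ===== CLAIM (what is proved, stated in full; the proofs are below) =====
def Claim_equal_sum_of_items_at_odd_index : Prop := ∀ (listparameter : List Int), Dom_sum_of_items_at_odd_index listparameter → Spec_sum_of_items_at_odd_index listparameter (sum_of_items_at_odd_index listparameter)

-- ===== LEMMAS AND PROOFS =====

-- the counting loop returns the length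
theorem pv_count_loop (xs : List Int) (c : Int) :
    xs.foldl (fun acc _ => acc + 1) c = c + xs.length := by
  induction xs generalizing c with
  | nil => simp
  | cons x xs ih => simp [List.foldl, ih (c + 1)]; omega

-- conditional-accumulation fold = accumulator plus a sum of ite-terms
theorem pv_foldl_if_sum (g : Int → Int) (l : List Int) (c : Int) :
    l.foldl (fun s i => if i % 2 ≠ 0 then s + g i else s) c
      = c + (l.map (fun i => if i % 2 ≠ 0 then g i else 0)).sum := by
  induction l generalizing c with
  | nil => simp
  | cons x l ih =>
    simp only [List.foldl_cons, List.map_cons, List.sum_cons]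
    by_cases h : x % 2 ≠ 0
    · rw [if_pos h, if_pos h, ih]; ring
    · rw [if_neg h, if_neg h, ih]; ring

-- proof-only helper: the odd-index sum as a pairwise recursion
def pvOdd : List Int → Int
  | [] => 0
  | [_] => 0
  | _ :: y :: rest => y + pvOdd rest

-- B's toggle fold consumes pairs: two steps from (s, false) add the second element
theorem pv_alt_pair (f : Int × Bool → Int → Int × Bool)
    (hf : f = fun st item => (if st.2 then st.1 + item else st.1, !st.2))
    (x y : Int) (rest : List Int) (s : Int) :
    ((x :: y :: rest).foldl f (s, false)).1 = (rest.foldl f (s + y, false)).1 := by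
  subst hf; simp [List.foldl]

-- B's toggle fold equals the pairwise recursion (plus the accumulator)
theorem pv_alt_eq_pvOdd (xs : List Int) : ∀ s : Int,
    (xs.foldl (fun st item => (if st.2 then st.1 + item else st.1, !st.2)) (s, false)).1
      = s + pvOdd xs := by
  induction xs using pvOdd.induct with
  | case1 => simp [pvOdd]
  | case2 x => simp [pvOdd, List.foldl]
  | case3 x y rest ih =>
    intro s
    rw [pv_alt_pair _ rfl, ih (s + y)]
    simp [pvOdd]; ring

-- the parity-filtered index sum over range(len xs) is the pairwise recursion
theorem pv_main (xs : List Int) :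
    ((List.range xs.length).map
        (fun (k : Nat) => if (k : Int) % 2 ≠ 0 then xs.getD k 0 else 0)).sum
      = pvOdd xs := by
  induction xs using pvOdd.induct with
  | case1 => simp [pvOdd]
  | case2 x => simp [pvOdd]
  | case3 x y rest ih =>
    have hr : List.range (rest.length + 1 + 1)
        = 0 :: 1 :: (List.range rest.length).map (fun k => k + 2) := by
      rw [List.range_succ_eq_map, List.range_succ_eq_map]
      simp [List.map_map, Function.comp]
    simp only [pvOdd, List.length_cons, hr, List.map_cons,
      List.map_map, List.sum_cons]
    have hmap : ∀ k : Nat,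
        ((fun (k : Nat) => if (k : Int) % 2 ≠ 0 then (x :: y :: rest).getD k 0 else 0) ∘
          (fun k => k + 2)) k
        = (fun (k : Nat) => if (k : Int) % 2 ≠ 0 then rest.getD k 0 else 0) k := by
      intro k
      simp [Function.comp]
    rw [List.map_congr_left (fun k _ => hmap k), ih]
    norm_num

-- ===== VERDICT (by name: the statement is the Claim_ definition above) =====
theorem sum_of_items_at_odd_index_spec : Claim_equal_sum_of_items_at_odd_index := by
  intro xs _
  show _ = _
  simp only [sum_of_items_at_odd_index]
  rw [pv_count_loop, PySem.List.pyRange_one]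
  rw [pv_foldl_if_sum]
  simp only [List.map_map, zero_add, Int.toNat_natCast]
  rw [show sum_of_items_at_odd_index_alt xs = 0 + pvOdd xs from by
        simpa [sum_of_items_at_odd_index_alt] using pv_alt_eq_pvOdd xs 0, ← pv_main xs]
  simp only [Int.sub_zero, Int.toNat_natCast, zero_add]
  congr 1
  apply List.map_congr_left
  intro k _
  simp [Function.comp, PySem.List.pyGetD_natCast]
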